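-- pv_equiv track=rewrite | github.com/dzhang379-school/google-games | AlphabetCake.py | fill_row
-- ===== SOURCE A (Python) =====
-- def fill_row(row):
--     curr = '?'
--     for i in range(len(row)):
--         if row[i] == '?':
--             row[i] = curr
--         else:
--             curr = row[i]
--     for i in range(len(row) - 1, -1, -1):
--         if row[i] == '?':
--             row[i] = curr
--         else:
--             curr = row[i]
--     return row
-- ===== SOURCE B (Python) =====
-- def fill_row(row):
--     # One prescan for the first non-'?' letter, then a single forward pass
--     # (A's backward pass exists only to give leading '?'s that first letter).
--     # Mutates row in place and returns it, like A.
--     curr = next((x for x in row if x != '?'), None)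
--     if curr is None:
--         return row
--     for i in range(len(row)):
--         if row[i] == '?':
--             row[i] = curr
--         else:
--             curr = row[i]
--     return row
-- ===== Notes on version B (the rewrite author's own statement) =====
-- stated objective: simpler
-- what changed: Replaces A's forward-then-backward two-pass index loop with a prescan for the first non-'?' letter followed by a single forward pass (A's backward pass exists only to give leading '?'s that first letter).
import Mathlib
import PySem

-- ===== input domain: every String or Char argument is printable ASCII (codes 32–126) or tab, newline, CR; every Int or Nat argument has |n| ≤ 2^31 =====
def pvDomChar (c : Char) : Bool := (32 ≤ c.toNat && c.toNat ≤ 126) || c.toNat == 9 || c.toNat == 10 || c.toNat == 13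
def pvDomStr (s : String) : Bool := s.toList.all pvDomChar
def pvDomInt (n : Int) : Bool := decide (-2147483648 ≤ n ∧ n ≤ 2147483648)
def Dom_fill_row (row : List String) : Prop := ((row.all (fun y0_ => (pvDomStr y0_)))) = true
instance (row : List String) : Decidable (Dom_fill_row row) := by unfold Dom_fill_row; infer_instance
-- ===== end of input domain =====

-- B replaces A's forward+backward two-pass structure by one prescan for the first
-- non-'?' letter plus a single forward pass (objective: simpler).  Both Pythons
-- mutate `row` in place and return it; the equivalence proved here is about the
-- returned value (B performs the same in-place mutation).

-- ===== PORT A =====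
-- the loop body shared by both of A's index loops: read row[i], either write curr
-- into it or update curr
def fillStep (st : List String × String) (i : Int) : List String × String :=
  if PySem.List.pyGetD st.1 i "" = "?" then (PySem.List.pySetD st.1 i st.2, st.2)
  else (st.1, PySem.List.pyGetD st.1 i "")

def fill_row (row : List String) : List String :=
  let s1 := (PySem.List.pyRange 0 (row.length : Int) 1).foldl fillStep (row, "?")
  let s2 := (PySem.List.pyRange ((row.length : Int) - 1) (-1) (-1)).foldl fillStep s1
  s2.1

-- ===== PORT B =====
-- B's forward index loop only ever reads row[i] before writing it and carries curr,
-- so it is transcribed as the obvious structural forward pass over the list.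
def fwdFill (curr : String) : List String → List String
  | [] => []
  | x :: xs => if x = "?" then curr :: fwdFill curr xs else x :: fwdFill x xs

def fill_row_alt (row : List String) : List String :=
  match row.find? (fun x => x != "?") with   -- next((x for x in row if x != '?'), None)
  | none => row
  | some c => fwdFill c row

-- ===== PRECONDITION & SPEC =====
def Spec_fill_row (row : List String) (out : List String) : Prop := out = fill_row_alt row
instance (row : List String) (out : List String) : Decidable (Spec_fill_row row out) := by unfold Spec_fill_row; infer_instance

-- ===== CLAIM (what is proved, stated in full; the proofs are below) =====
def Claim_equal_fill_row : Prop := ∀ (row : List String), Dom_fill_row row → Spec_fill_row row (fill_row row)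

-- ===== LEMMAS AND PROOFS =====

-- the value of curr after a forward pass
def lastSeen (curr : String) : List String → String
  | [] => curr
  | x :: xs => if x = "?" then lastSeen curr xs else lastSeen x xs

theorem length_fwdFill (curr : String) (l : List String) :
    (fwdFill curr l).length = l.length := by
  induction l generalizing curr with
  | nil => rfl
  | cons x xs ih => simp only [fwdFill]; split <;> simp [ih]

theorem fwdFill_append (c : String) (l l' : List String) :
    fwdFill c (l ++ l') = fwdFill c l ++ fwdFill (lastSeen c l) l' := by
  induction l generalizing c with
  | nil => rfl
  | cons x xs ih =>
    by_cases hx : x = "?" <;> simp [fwdFill, lastSeen, hx, ih]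

theorem lastSeen_append (c : String) (l l' : List String) :
    lastSeen c (l ++ l') = lastSeen (lastSeen c l) l' := by
  induction l generalizing c with
  | nil => rfl
  | cons x xs ih =>
    by_cases hx : x = "?" <;> simp [lastSeen, hx, ih]

theorem fwdFill_all_q (c : String) (l : List String) (h : ∀ x ∈ l, x = "?") :
    fwdFill c l = List.replicate l.length c := by
  induction l with
  | nil => rfl
  | cons x xs ih =>
    have hx := h x (by simp)
    simp only [fwdFill, hx, List.length_cons, List.replicate_succ]
    exact congrArg _ (ih fun y hy => h y (by simp [hy]))

theorem lastSeen_all_q (c : String) (l : List String) (h : ∀ x ∈ l, x = "?") :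
    lastSeen c l = c := by
  induction l with
  | nil => rfl
  | cons x xs ih =>
    have hx := h x (by simp)
    simp only [lastSeen, hx]
    exact ih fun y hy => h y (by simp [hy])

theorem fwdFill_no_q (c : String) (l : List String) (hc : c ≠ "?") :
    (∀ y ∈ fwdFill c l, y ≠ "?") ∧ lastSeen c l ≠ "?" := by
  induction l generalizing c with
  | nil => exact ⟨by simp [fwdFill], hc⟩
  | cons x xs ih =>
    by_cases hx : x = "?"
    · simp only [fwdFill, lastSeen, hx]
      obtain ⟨h1, h2⟩ := ih c hc
      exact ⟨by intro y hy; rcases List.mem_cons.1 hy with rfl | hy; exact hc; exact h1 y hy, h2⟩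
    · simp only [fwdFill, lastSeen, if_neg hx]
      obtain ⟨h1, h2⟩ := ih x hx
      exact ⟨by intro y hy; rcases List.mem_cons.1 hy with rfl | hy; exact hx; exact h1 y hy, h2⟩

theorem fwdFill_of_no_q (c : String) (l : List String) (h : ∀ x ∈ l, x ≠ "?") :
    fwdFill c l = l := by
  induction l generalizing c with
  | nil => rfl
  | cons x xs ih =>
    have hx := h x (by simp)
    simp only [fwdFill, if_neg hx]
    exact congrArg _ (ih x fun y hy => h y (by simp [hy]))

-- A's forward loop computes (fwdFill, lastSeen)
theorem A_fwd_loop (l : List String) (pre : List String) (curr : String) :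
    (PySem.List.pyRange (pre.length : Int) ((pre.length : Int) + (l.length : Int)) 1).foldl
        fillStep (pre ++ l, curr)
      = (pre ++ fwdFill curr l, lastSeen curr l) := by
  induction l generalizing pre curr with
  | nil =>
    rw [PySem.List.pyRange_one_eq_nil (by simp)]
    simp [fwdFill, lastSeen]
  | cons x xs ih =>
    rw [PySem.List.pyRange_one_cons (by simp only [List.length_cons]; push_cast; omega)]
    have hget : PySem.List.pyGetD (pre ++ x :: xs) (pre.length : Int) "" = x := by
      rw [PySem.List.pyGetD_natCast]
      simp [List.getD]
    simp only [List.foldl_cons, fillStep, hget]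
    by_cases hx : x = "?"
    · rw [if_pos hx]
      have hset : PySem.List.pySetD (pre ++ x :: xs) (pre.length : Int) curr
          = (pre ++ [curr]) ++ xs := by
        rw [PySem.List.pySetD_natCast]
        rw [List.set_append_right _ _ (Nat.le_refl pre.length)]
        simp
      have := ih (pre ++ [curr]) curr
      simp only [List.length_append, List.length_singleton] at this
      rw [hset]
      have harith : ((pre.length : Int) + 1) = ((pre.length + 1 : Nat) : Int) := by push_cast; ring
      have harith2 : ((pre.length : Int) + ((x :: xs).length : Int))
          = ((pre.length + 1 : Nat) : Int) + (xs.length : Int) := by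
        simp only [List.length_cons]; push_cast; ring
      rw [harith, harith2, this]
      simp [fwdFill, lastSeen, hx]
    · rw [if_neg hx]
      have := ih (pre ++ [x]) x
      simp only [List.length_append, List.length_singleton] at this
      have harith : ((pre.length : Int) + 1) = ((pre.length + 1 : Nat) : Int) := by push_cast; ring
      have harith2 : ((pre.length : Int) + ((x :: xs).length : Int))
          = ((pre.length + 1 : Nat) : Int) + (xs.length : Int) := by
        simp only [List.length_cons]; push_cast; ring
      have hassoc : pre ++ x :: xs = (pre ++ [x]) ++ xs := by simp
      rw [hassoc, harith, harith2, this]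
      simp [fwdFill, lastSeen, hx]

-- A's backward loop is a forward pass over the reversed list
theorem A_bwd_loop (l : List String) (suf : List String) (curr : String) :
    (PySem.List.pyRange ((l.length : Int) - 1) (-1) (-1)).foldl fillStep (l ++ suf, curr)
      = ((fwdFill curr l.reverse).reverse ++ suf, lastSeen curr l.reverse) := by
  induction l using List.reverseRecOn generalizing suf curr with
  | nil =>
    rw [PySem.List.pyRange_neg_one_eq_nil (by simp)]
    simp [fwdFill, lastSeen]
  | append_singleton init x ih =>
    have hlen : (((init ++ [x]).length : Int) - 1) = (init.length : Int) := by
      simp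
    rw [hlen, PySem.List.pyRange_neg_one_cons (by omega)]
    have hget : PySem.List.pyGetD ((init ++ [x]) ++ suf) (init.length : Int) "" = x := by
      rw [PySem.List.pyGetD_natCast]
      rw [List.append_assoc]
      simp [List.getD]
    simp only [List.foldl_cons, fillStep, hget]
    have harith : (init.length : Int) - 1 = ((init.length : Int)) - 1 := rfl
    by_cases hx : x = "?"
    · rw [if_pos hx]
      have hset : PySem.List.pySetD ((init ++ [x]) ++ suf) (init.length : Int) curr
          = init ++ (curr :: suf) := by
        rw [PySem.List.pySetD_natCast, List.append_assoc]
        rw [List.set_append_right _ _ (Nat.le_refl init.length)]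
        simp
      rw [hset]
      have := ih (curr :: suf) curr
      rw [show init ++ curr :: suf = init ++ (curr :: suf) from rfl, this]
      simp [fwdFill, hx, lastSeen]
    · rw [if_neg hx]
      have := ih (x :: suf) x
      rw [List.append_assoc, show [x] ++ suf = x :: suf from rfl, this]
      simp [fwdFill, hx, lastSeen]

-- decomposition given by find?
theorem find?_decomp (l : List String) (c : String)
    (h : l.find? (fun x => x != "?") = some c) :
    ∃ q t, l = q ++ c :: t ∧ (∀ x ∈ q, x = "?") ∧ c ≠ "?" := by
  induction l with
  | nil => simp [List.find?] at h
  | cons x xs ih =>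
    by_cases hx : x = "?"
    · rw [List.find?_cons_of_neg (by simp [hx])] at h
      obtain ⟨q, t, h1, h2, h3⟩ := ih h
      refine ⟨x :: q, t, by simp [h1], ?_, h3⟩
      intro y hy
      rcases List.mem_cons.1 hy with rfl | hy
      · exact hx
      · exact h2 y hy
    · rw [List.find?_cons_of_pos (by simp [hx])] at h
      obtain rfl : x = c := by simpa using h
      exact ⟨[], xs, rfl, by simp, hx⟩

theorem fill_row_eq (row : List String) : fill_row row = fill_row_alt row := by
  have hA : fill_row row = (fwdFill (lastSeen "?" row) ((fwdFill "?" row).reverse)).reverse := by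
    show ((PySem.List.pyRange ((row.length : Int) - 1) (-1) (-1)).foldl fillStep
        ((PySem.List.pyRange 0 (row.length : Int) 1).foldl fillStep (row, "?"))).1
      = (fwdFill (lastSeen "?" row) ((fwdFill "?" row).reverse)).reverse
    have h1 := A_fwd_loop row [] "?"
    simp only [List.length_nil, Nat.cast_zero, zero_add, List.nil_append] at h1
    rw [h1]
    have hlen : (row.length : Int) = ((fwdFill "?" row).length : Int) := by
      rw [length_fwdFill]
    rw [hlen]
    have h2 := A_bwd_loop (fwdFill "?" row) [] (lastSeen "?" row)
    simp only [List.append_nil] at h2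
    rw [h2]
  rw [hA]
  cases hf : row.find? (fun x => x != "?") with
  | none =>
    have hall : ∀ x ∈ row, x = "?" := by
      intro x hx
      have := List.find?_eq_none.1 hf x hx
      simpa using this
    have h1 : fwdFill "?" row = row := by
      rw [fwdFill_all_q _ _ hall]
      exact (List.eq_replicate_of_mem hall).symm
    have h2 : lastSeen "?" row = "?" := lastSeen_all_q _ _ hall
    have hallr : ∀ x ∈ row.reverse, x = "?" := by
      intro x hx; exact hall x (List.mem_reverse.1 hx)
    rw [h1, h2, fwdFill_all_q _ _ hallr]
    rw [show (List.replicate row.reverse.length "?") = row.reverse by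
      simpa using (List.eq_replicate_of_mem hallr).symm]
    simp [fill_row_alt, hf]
  | some c =>
    obtain ⟨q, t, rfl, hq, hc⟩ := find?_decomp _ _ hf
    have hqr : ∀ x ∈ q.reverse, x = "?" := fun x hx => hq x (List.mem_reverse.1 hx)
    -- A side
    have hs1 : fwdFill "?" (q ++ c :: t) = q ++ c :: fwdFill c t := by
      rw [fwdFill_append, lastSeen_all_q _ _ hq, fwdFill_all_q _ _ hq]
      rw [show (List.replicate q.length "?") = q by
        simpa using (List.eq_replicate_of_mem hq).symm]
      simp [fwdFill, hc]
    have hL : lastSeen "?" (q ++ c :: t) = lastSeen c t := by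
      rw [lastSeen_append, lastSeen_all_q _ _ hq]
      simp [lastSeen, hc]
    set u := fwdFill c t with hu
    obtain ⟨hu_noq, -⟩ := fwdFill_no_q c t hc
    have hrev : (q ++ c :: u).reverse = u.reverse ++ c :: q.reverse := by
      simp
    rw [hs1, hL, hrev]
    have hur : ∀ x ∈ u.reverse, x ≠ "?" := fun x hx => hu_noq x (List.mem_reverse.1 hx)
    rw [fwdFill_append, fwdFill_of_no_q _ _ hur]
    have hcons : fwdFill (lastSeen (lastSeen c t) u.reverse) (c :: q.reverse)
        = c :: List.replicate q.reverse.length c := by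
      simp only [fwdFill, if_neg hc]
      rw [fwdFill_all_q _ _ hqr]
    rw [hcons]
    -- B side
    have hB : fill_row_alt (q ++ c :: t) = fwdFill c (q ++ c :: t) := by
      simp [fill_row_alt, hf]
    rw [hB, fwdFill_append, fwdFill_all_q _ _ hq, lastSeen_all_q _ _ hq]
    simp only [fwdFill, if_neg hc]
    simp [← hu]

-- ===== VERDICT (by name: the statement is the Claim_ definition above) =====
theorem fill_row_spec : Claim_equal_fill_row := by
  intro row _
  unfold Spec_fill_row
  exact fill_row_eq row
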